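-- pv_equiv track=rewrite | github.com/MinJunKimKR/practice-programming | algorithm/programmers/highScoreKit/stack_queue/2_developFunc.py | solution
-- ===== SOURCE A (Python) =====
-- from collections import deque
-- import math
--
-- def solution(progresses, speeds):
--     answer = []
--     count = 1
--     turns = []
--     for i in range(len(progresses)):
--         turns.append(math.ceil((100-progresses[i])/speeds[i]))
--     turns = deque(turns)
--     set = turns.popleft()
--     while turns:
--         now = turns.popleft()
--         if now > set:
--             answer.append(count)
--             set = now
--             count = 1
--         else:
--             count += 1
--     answer.append(count)
--     return answer
-- ===== SOURCE B (Python) =====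
-- import math
-- from collections import Counter
--
--
-- def solution(progresses, speeds):
--     turns = [math.ceil((100 - p) / s) for p, s in zip(progresses, speeds)]
--     last = turns[0]
--     peaks = [last]
--     for t in turns[1:]:
--         last = max(last, t)
--         peaks.append(last)
--     return list(Counter(peaks).values())
-- ===== Notes on version B (the rewrite author's own statement) =====
-- stated objective: alternative
-- what changed: B never detects group boundaries or keeps a running count: it materialises the prefix-maximum (peak) sequence of the completion days and obtains the group sizes as the multiplicities of its distinct values via Counter, since each release's features are exactly the positions sharing one peak value.
import Mathlib
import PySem

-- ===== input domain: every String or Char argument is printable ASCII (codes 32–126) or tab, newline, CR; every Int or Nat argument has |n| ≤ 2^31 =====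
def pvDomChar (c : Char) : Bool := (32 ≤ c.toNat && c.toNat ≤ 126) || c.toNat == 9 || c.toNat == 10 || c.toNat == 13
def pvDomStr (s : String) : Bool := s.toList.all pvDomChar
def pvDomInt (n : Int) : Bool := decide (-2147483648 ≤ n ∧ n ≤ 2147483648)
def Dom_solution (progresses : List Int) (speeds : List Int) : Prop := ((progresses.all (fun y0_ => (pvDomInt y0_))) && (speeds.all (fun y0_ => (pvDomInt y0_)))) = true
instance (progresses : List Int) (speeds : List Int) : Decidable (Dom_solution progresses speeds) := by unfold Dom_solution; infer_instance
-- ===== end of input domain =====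

-- B replaces A's boundary-detecting counting loop by two stages: build the prefix-maximum (peak)
-- sequence of the completion days, then read the group sizes off as Counter(peaks).values()
-- (objective: alternative; same O(n) cost).
-- On Dom_ the intermediate |100-p| ≤ 2^31+100 < 2^52 and |s| ≤ 2^31, so Python's float division is
-- correctly rounded and math.ceil((100-p)/s) equals exact ceiling division -((-(100-p))//s):
-- both ports use that exact form.

-- ===== PORT A =====
-- math.ceil((100-p)/s); exact on Dom_ (see header)
def pyCeilTurn (p : Int) (s : Int) : Int := -(PySem.Int.floordiv (-(100 - p)) s)

-- the while-loop over the deque: state (set, count, answer)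
def aLoop : List Int → Int → Int → List Int → List Int
  | [], _, count, answer => answer ++ [count]
  | now :: rest, st, count, answer =>
      if now > st then aLoop rest now 1 (answer ++ [count])
      else aLoop rest st (count + 1) answer

def solution (progresses : List Int) (speeds : List Int) : List Int :=
  -- turns.append(math.ceil((100-progresses[i])/speeds[i])) for i in range(len(progresses));
  -- the indices are in range under Pre_, so pyGetD's default is never read
  let turns := (List.range progresses.length).map
    (fun (i : Nat) => pyCeilTurn (PySem.List.pyGetD progresses ((i : Nat) : Int) 0) (PySem.List.pyGetD speeds ((i : Nat) : Int) 1))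
  match turns with
  | [] => []          -- unreachable under Pre_: Python raises IndexError on popleft from empty
  | st :: rest => aLoop rest st 1 []

-- ===== PORT B =====
-- for t in turns[1:]: last = max(last, t); peaks.append(last)
def peaksLoop : List Int → Int → List Int → List Int
  | [], _, peaks => peaks
  | t :: ts, last, peaks => peaksLoop ts (max last t) (peaks ++ [max last t])

def solution_alt (progresses : List Int) (speeds : List Int) : List Int :=
  let turns := (progresses.zip speeds).map (fun ps => pyCeilTurn ps.1 ps.2)
  match turns with
  | [] => []          -- unreachable under Pre_: Python raises IndexError on turns[0]
  | r :: rest =>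
    let peaks := peaksLoop rest r [r]
    (PySem.Dict.counter peaks).values      -- list(Counter(peaks).values())

-- ===== PRECONDITION & SPEC =====
-- exactly where Python A returns: nonempty progresses (else IndexError on popleft), speeds long
-- enough for every index (else IndexError), and no zero speed among those used (else ZeroDivisionError)
def Pre_solution (progresses : List Int) (speeds : List Int) : Prop :=
  progresses ≠ [] ∧ progresses.length ≤ speeds.length ∧
    ∀ s ∈ speeds.take progresses.length, s ≠ 0

instance (progresses : List Int) (speeds : List Int) : Decidable (Pre_solution progresses speeds) := by
  unfold Pre_solution; infer_instance

def pvWitness_solution : List Int × List Int := ([93, 30, 55], [1, 30, 5])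

def Spec_solution (progresses : List Int) (speeds : List Int) (out : List Int) : Prop := out = solution_alt progresses speeds
instance (progresses : List Int) (speeds : List Int) (out : List Int) : Decidable (Spec_solution progresses speeds out) := by unfold Spec_solution; infer_instance

-- ===== CLAIM (what is proved, stated in full; the proofs are below) =====
def Claim_equal_solution : Prop := ∀ (progresses : List Int) (speeds : List Int), Dom_solution progresses speeds → Pre_solution progresses speeds → Spec_solution progresses speeds (solution progresses speeds)

-- ===== LEMMAS AND PROOFS =====

-- A's loop reduced to the reference recursion of group sizes
def groups : List Int → Int → Int → List Int
  | [], _, c => [c]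
  | t :: ts, r, c => if t > r then c :: groups ts t 1 else groups ts r (c + 1)

theorem aLoop_eq_groups (ts : List Int) (r c : Int) (ans : List Int) :
    aLoop ts r c ans = ans ++ groups ts r c := by
  induction ts generalizing r c ans with
  | nil => simp [aLoop, groups]
  | cons t ts ih =>
      simp only [aLoop, groups]
      split
      · rw [ih]; simp
      · rw [ih]

-- the peak values pushed by B's loop (without the accumulator)
def pk : List Int → Int → List Int
  | [], _ => []
  | t :: ts, r => max r t :: pk ts (max r t)

theorem peaksLoop_eq_pk (ts : List Int) (r : Int) (acc : List Int) :
    peaksLoop ts r acc = acc ++ pk ts r := by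
  induction ts generalizing r acc with
  | nil => simp [peaksLoop, pk]
  | cons t ts ih => simp [peaksLoop, pk, ih]

theorem le_of_mem_pk (ts : List Int) (r : Int) : ∀ x ∈ pk ts r, r ≤ x := by
  induction ts generalizing r with
  | nil => simp [pk]
  | cons t ts ih =>
      intro x hx
      simp only [pk, List.mem_cons] at hx
      rcases hx with h | h
      · simp [h]
      · exact le_trans (le_max_left r t) (ih (max r t) x h)

-- the multiplicity list Counter(l).values() computes
def F (l : List Int) : List Int := (PySem.Set.ofList l).map (fun k => (l.count k : Int))

theorem values_counter_eq_F (l : List Int) : (PySem.Dict.counter l).values = F l := by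
  simp [PySem.Dict.values, PySem.Dict.items_counter, F, List.map_map, Function.comp]

theorem ofList_replicate (c : Nat) (r : Int) (hc : 1 ≤ c) :
    PySem.Set.ofList (List.replicate c r) = [r] := by
  obtain ⟨n, rfl⟩ : ∃ n, c = n + 1 := ⟨c - 1, by omega⟩
  rw [List.replicate_succ]
  have h1 : PySem.Set.ofList (r :: List.replicate n r)
      = PySem.Set.update [r] (List.replicate n r) := by
    simp [PySem.Set.ofList_eq_foldl, PySem.Set.update, PySem.Set.add, PySem.Set.contains]
  rw [h1, PySem.Set.update_eq_append_filter]
  have h2 : (PySem.Set.ofList (List.replicate n r)).filter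
      (fun y => !(PySem.Set.contains [r] y)) = [] := by
    apply List.filter_eq_nil_iff.mpr
    intro y hy
    have hyr : y = r := by
      have hm : y ∈ List.replicate n r := (PySem.Set.mem_ofList (List.replicate n r) y).mp hy
      simpa using List.eq_of_mem_replicate hm
    simp [hyr, PySem.Set.contains]
  rw [h2]; rfl

theorem F_split (c : Nat) (r : Int) (rest : List Int) (hc : 1 ≤ c) (hr : r ∉ rest) :
    F (List.replicate c r ++ rest) = (c : Int) :: F rest := by
  have hof : PySem.Set.ofList (List.replicate c r ++ rest) = r :: PySem.Set.ofList rest := by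
    rw [PySem.Set.ofList_append, ofList_replicate c r hc, PySem.Set.update_eq_append_filter]
    have h2 : (PySem.Set.ofList rest).filter (fun y => !(PySem.Set.contains [r] y))
        = PySem.Set.ofList rest := by
      apply List.filter_eq_self.mpr
      intro y hy
      have hyr : y ≠ r := fun h => hr (h ▸ (PySem.Set.mem_ofList rest y).mp hy)
      simp [PySem.Set.contains, hyr]
    rw [h2]; rfl
  unfold F
  rw [hof, List.map_cons]
  congr 1
  · rw [List.count_append, List.count_replicate]
    simp [List.count_eq_zero.mpr hr]
  · apply List.map_congr_left
    intro k hk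
    have hkr : k ≠ r := fun h => hr (h ▸ (PySem.Set.mem_ofList rest k).mp hk)
    rw [List.count_append, List.count_replicate]
    simp [Ne.symm hkr]

theorem F_pk_eq_groups (ts : List Int) (r : Int) (c : Nat) (hc : 1 ≤ c) :
    F (List.replicate c r ++ pk ts r) = groups ts r (c : Int) := by
  induction ts generalizing r c with
  | nil => simpa [pk, groups] using F_split c r [] hc (by simp)
  | cons t ts ih =>
      by_cases h : t > r
      · have hm : max r t = t := max_eq_right (le_of_lt h)
        have hnotin : r ∉ (t :: pk ts t) := by
          intro hmem
          rcases List.mem_cons.mp hmem with h1 | h1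
          · omega
          · exact absurd (le_of_mem_pk ts t r h1) (by omega)
        rw [show pk (t :: ts) r = t :: pk ts t by simp [pk, hm],
          F_split c r (t :: pk ts t) hc hnotin,
          show (t :: pk ts t) = List.replicate 1 t ++ pk ts t from rfl,
          ih t 1 (le_refl 1)]
        simp [groups, h]
      · have hm : max r t = r := max_eq_left (by omega)
        have hrep : List.replicate c r ++ pk (t :: ts) r
            = List.replicate (c + 1) r ++ pk ts r := by
          simp [pk, hm, List.replicate_succ']
        rw [hrep, ih r (c + 1) (by omega)]
        simp only [groups, h]
        push_cast
        simp

theorem turns_eq (progresses speeds : List Int) (h : progresses.length ≤ speeds.length) :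
    (List.range progresses.length).map
      (fun (i : Nat) => pyCeilTurn (PySem.List.pyGetD progresses ((i : Nat) : Int) 0) (PySem.List.pyGetD speeds ((i : Nat) : Int) 1))
      = (progresses.zip speeds).map (fun ps => pyCeilTurn ps.1 ps.2) := by
  induction progresses generalizing speeds with
  | nil => simp
  | cons p ps ih =>
      cases speeds with
      | nil => simp at h
      | cons s ss =>
          simp only [List.length_cons, List.range_succ_eq_map, List.map_cons, List.map_map,
            List.zip_cons_cons]
          congr 1
          · simp [pysem]
          · rw [← ih ss (by simpa using h)]
            apply List.map_congr_left
            intro j hj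
            simp only [Function.comp_apply, Nat.succ_eq_add_one,
              PySem.List.pyGetD_natCast, List.getD_cons_succ]

theorem solution_eq_alt (progresses speeds : List Int)
    (_hne : progresses ≠ []) (hlen : progresses.length ≤ speeds.length) :
    solution progresses speeds = solution_alt progresses speeds := by
  unfold solution solution_alt
  rw [turns_eq progresses speeds hlen]
  set turns := (progresses.zip speeds).map (fun ps => pyCeilTurn ps.1 ps.2) with hturns
  match hT : turns with
  | [] => rfl
  | r :: rest =>
      simp only []
      rw [peaksLoop_eq_pk, values_counter_eq_F, aLoop_eq_groups]
      have h1 : ([r] : List Int) ++ pk rest r = List.replicate 1 r ++ pk rest r := rfl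
      rw [h1, F_pk_eq_groups rest r 1 (le_refl 1)]
      simp

-- ===== VERDICT (by name: the statement is the Claim_ definition above) =====
theorem solution_spec : Claim_equal_solution := by
  intro progresses speeds _ hpre
  unfold Spec_solution
  exact solution_eq_alt progresses speeds hpre.1 hpre.2.1
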